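-- pv_equiv track=rewrite | github.com/TreasureMaster/Practice_ch_5678 | extras/sqlparser.py | dict_from_lists
-- ===== SOURCE A (Python) =====
-- import itertools
--
-- def grouper(iterable, n, fillvalue=None):
--     """Функция для разделения списка на равные части (предложена в документации (Python)
--
--     :param iterable: Итерируемый объект (н-р, список)
--     :param n: Количество элементов в отделенных частях на выходе
--     :param fillvalue: Заполнитель для отсутствующих элементов
--     """
--     return itertools.zip_longest(
--         *([iter(iterable)]*n),
--         fillvalue=fillvalue
--     )
--
-- def dict_from_lists(headers, values):
--     """Создает словарь из списков ключей и значений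
--
--     :param headers: Ключи создаваемого словаря
--     :param values: Список значений словаря
--     """
--     return [
--         {key: value for key, value in zip(ks, vs)}
--         for ks, vs in zip(
--             itertools.cycle([headers]),
--             grouper(values, len(headers))
--         )
--     ]
-- ===== SOURCE B (Python) =====
-- def dict_from_lists(headers, values):
--     """Создает словарь из списков ключей и значений
--
--     :param headers: Ключи создаваемого словаря
--     :param values: Список значений словаря
--     """
--     n = len(headers)
--     if n == 0:
--         return []
--     result = []
--     for i in range(0, len(values), n):
--         chunk = list(values[i:i + n])
--         chunk += [None] * (n - len(chunk))
--         result.append(dict(zip(headers, chunk)))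
--     return result
-- ===== Notes on version B (the rewrite author's own statement) =====
-- stated objective: simpler
-- what changed: Replaces the itertools cycle/zip_longest shared-iterator grouper and per-row dict comprehension with a plain index-stepping loop that slices values in chunks of len(headers), pads the last chunk with None, and builds each row with dict(zip(...)).
import Mathlib
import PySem

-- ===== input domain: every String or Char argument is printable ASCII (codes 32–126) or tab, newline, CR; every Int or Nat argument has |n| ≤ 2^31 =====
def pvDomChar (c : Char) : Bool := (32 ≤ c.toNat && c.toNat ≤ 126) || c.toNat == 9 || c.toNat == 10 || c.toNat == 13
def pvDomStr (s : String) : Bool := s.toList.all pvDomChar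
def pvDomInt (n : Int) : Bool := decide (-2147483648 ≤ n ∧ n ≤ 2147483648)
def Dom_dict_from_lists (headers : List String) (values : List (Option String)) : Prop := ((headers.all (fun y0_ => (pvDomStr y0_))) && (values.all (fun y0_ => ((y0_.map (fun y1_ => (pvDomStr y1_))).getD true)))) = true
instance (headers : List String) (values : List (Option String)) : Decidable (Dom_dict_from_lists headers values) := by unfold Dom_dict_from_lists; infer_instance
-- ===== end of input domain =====

-- B replaces A's itertools cycle/zip_longest shared-iterator grouper with an explicit
-- index-stepping slice-and-pad loop (objective: simpler); same return value, no side effects.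

-- ===== PORT A =====
-- grouper(values, n): zip_longest over n copies of ONE iterator = successive chunks of n,
-- the last padded with the fillvalue None; zip_longest of ZERO iterables (n = 0) is empty.
def pvGrouperA (n : Nat) (xs : List (Option String)) : List (List (Option String)) :=
  if n = 0 then []
  else match xs with
    | [] => []
    | x :: rest =>
      (let c := (x :: rest).take n
       c ++ List.replicate (n - c.length) (none : Option String)) :: pvGrouperA n ((x :: rest).drop n)
termination_by xs.length
decreasing_by simp_all; omega

def dict_from_lists (headers : List String) (values : List (Option String)) : List (List (String × Option String)) :=
  -- zip(cycle([headers]), grouper(values, len(headers))): each group is paired with headers;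
  -- {key: value for key, value in zip(ks, vs)} is an insertion fold over the zipped pairs
  (pvGrouperA headers.length values).map (fun vs =>
    ((headers.zip vs).foldl (fun d kv => d.insert kv.1 kv.2) PySem.Dict.empty).items)

-- ===== PORT B =====
def dict_from_lists_alt (headers : List String) (values : List (Option String)) : List (List (String × Option String)) :=
  let n := headers.length
  if n = 0 then []
  else
    (PySem.List.pyRange 0 (PySem.List.len values) (n : Int)).foldl
      (fun result i =>
        let chunk := PySem.List.slice values (some i) (some (i + (n : Int)))
        let chunk := chunk ++ List.replicate (n - chunk.length) (none : Option String)
        result ++ [(PySem.Dict.ofList (headers.zip chunk)).items]) []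

-- ===== PRECONDITION & SPEC =====
def Spec_dict_from_lists (headers : List String) (values : List (Option String)) (out : List (List (String × Option String))) : Prop := out = dict_from_lists_alt headers values
instance (headers : List String) (values : List (Option String)) (out : List (List (String × Option String))) : Decidable (Spec_dict_from_lists headers values out) := by unfold Spec_dict_from_lists; infer_instance

-- ===== CLAIM (what is proved, stated in full; the proofs are below) =====
def Claim_equal_dict_from_lists : Prop := ∀ (headers : List String) (values : List (Option String)), Dom_dict_from_lists headers values → Spec_dict_from_lists headers values (dict_from_lists headers values)

-- ===== LEMMAS AND PROOFS =====

-- range(0, L, n) for L > 0 starts at 0 and then is range(0, L-n, n) shifted by n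
lemma pyRange_pos_shift (n : Nat) (hn : 0 < n) (L : Int) (hL : 0 < L) :
    PySem.List.pyRange 0 L (n : Int) =
      0 :: (PySem.List.pyRange 0 (L - n) (n : Int)).map (fun i => i + (n : Int)) := by
  have hn' : (0 : Int) < n := by exact_mod_cast hn
  rw [PySem.List.pyRange_of_pos _ _ hn', PySem.List.pyRange_of_pos _ _ hn']
  have hcount : (if (0:Int) < L then ((L - 0 + n - 1) / n).toNat else 0)
      = (if (0:Int) < L - n then ((L - n - 0 + n - 1) / n).toNat else 0) + 1 := by
    rw [if_pos hL]
    by_cases hnL : (0:Int) < L - n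
    · rw [if_pos hnL]
      have h1 : L - 0 + n - 1 = (L - 1) + 1 * n := by ring
      have h2 : L - n - 0 + n - 1 = L - 1 := by ring
      rw [h1, h2, Int.add_mul_ediv_right _ _ (by omega : (n:Int) ≠ 0)]
      have : (0:Int) ≤ (L - 1) / n := Int.ediv_nonneg (by omega) (by omega)
      omega
    · rw [if_neg hnL]
      have hq : (L - 0 + n - 1) / n = 1 := by
        have h1 : (1:Int) ≤ (L - 0 + n - 1) / n := by
          rw [Int.le_ediv_iff_mul_le hn']; omega
        have h2 : (L - 0 + n - 1) / n < 2 := by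
          rw [Int.ediv_lt_iff_lt_mul hn']; omega
        omega
      rw [hq]; rfl
  rw [hcount, List.range_succ_eq_map]
  simp [List.map_map, Function.comp]
  intro a _
  ring

-- a chunk at offset i + n of vs is the chunk at offset i of vs.drop n
lemma slice_shift (vs : List (Option String)) (n : Nat) (i : Int) (hi : 0 ≤ i) :
    PySem.List.slice vs (some (i + n)) (some (i + n + n)) =
      PySem.List.slice (vs.drop n) (some i) (some (i + n)) := by
  rw [PySem.List.slice_toNat _ (by omega) (by omega), PySem.List.slice_toNat _ hi (by omega)]
  rw [List.drop_drop]
  congr 1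
  · omega
  · congr 1; omega

-- the index-stepping slice-and-pad pass equals A's grouper chunks
lemma slices_eq_grouper (n : Nat) (hn : 0 < n) :
    ∀ (vs : List (Option String)),
      (PySem.List.pyRange 0 (vs.length : Int) (n : Int)).map
        (fun i =>
          (PySem.List.slice vs (some i) (some (i + (n : Int)))) ++
            List.replicate (n - (PySem.List.slice vs (some i) (some (i + (n : Int)))).length)
              (none : Option String))
      = pvGrouperA n vs := by
  intro vs
  induction hm : vs.length using Nat.strong_induction_on generalizing vs with
  | _ m ih =>
  subst hm
  match vs with
  | [] =>
    have hn' : (0 : Int) < n := by exact_mod_cast hn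
    rw [PySem.List.pyRange_of_pos _ _ hn']
    simp [pvGrouperA]
  | x :: rest =>
    have hL : (0 : Int) < ((x :: rest).length : Int) := by simp
    rw [pyRange_pos_shift n hn _ hL]
    rw [List.map_cons, List.map_map]
    have hdrop : ((x :: rest).length : Int) - n = (((x :: rest).drop n).length : Int) ∨
        (((x :: rest).length : Int) - n ≤ 0 ∧ (((x :: rest).drop n).length : Int) = 0) := by
      by_cases h : n ≤ (x :: rest).length
      · left
        simp only [List.length_cons, List.length_drop] at h ⊢
        push_cast
        omega
      · right
        simp only [List.length_cons, List.length_drop] at h ⊢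
        constructor <;> [skip; push_cast] <;> omega
    have htail : (PySem.List.pyRange 0 (((x :: rest).length : Int) - n) (n : Int)) =
        (PySem.List.pyRange 0 ((((x :: rest).drop n).length : Int)) (n : Int)) := by
      rcases hdrop with h | ⟨h1, h2⟩
      · rw [h]
      · have hn' : (0 : Int) < n := by exact_mod_cast hn
        rw [h2]
        rw [PySem.List.pyRange_of_pos _ _ hn', PySem.List.pyRange_of_pos _ _ hn']
        rw [if_neg (by omega), if_neg (by omega)]
    rw [htail]
    rw [pvGrouperA.eq_def]
    simp only [if_neg (show ¬ n = 0 by omega)]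
    congr 1
    · -- head chunk: slice vs 0 n padded = take n padded
      have h0 : PySem.List.slice (x :: rest) (some 0) (some ((0 : Int) + n)) = (x :: rest).take n := by
        rw [PySem.List.slice_toNat _ (by omega) (by omega)]
        simp
      rw [h0]
    · -- tail: shift each slice into the dropped list, then apply the IH
      have hcong : ∀ i ∈ PySem.List.pyRange 0 ((((x :: rest).drop n).length : Int)) (n : Int),
          ((fun i =>
            (PySem.List.slice (x :: rest) (some i) (some (i + (n : Int)))) ++
              List.replicate (n - (PySem.List.slice (x :: rest) (some i) (some (i + (n : Int)))).length)
                (none : Option String)) ∘ (fun i => i + (n : Int))) i =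
          (fun i =>
            (PySem.List.slice ((x :: rest).drop n) (some i) (some (i + (n : Int)))) ++
              List.replicate (n - (PySem.List.slice ((x :: rest).drop n) (some i) (some (i + (n : Int)))).length)
                (none : Option String)) i := by
        intro i hi
        have hn' : (0 : Int) < n := by exact_mod_cast hn
        have hi0 : 0 ≤ i := by
          rcases (PySem.List.mem_pyRange_iff_of_pos hn' i).mp hi with ⟨h1, _⟩
          omega
        simp only [Function.comp]
        rw [slice_shift _ _ _ hi0]
      rw [List.map_congr_left hcong]
      exact ih ((x :: rest).drop n).length (by simp [List.length_drop]; omega) _ rfl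

-- ===== VERDICT (by name: the statement is the Claim_ definition above) =====
theorem dict_from_lists_spec : Claim_equal_dict_from_lists := by
  intro headers values _
  unfold Spec_dict_from_lists dict_from_lists dict_from_lists_alt
  by_cases h : headers.length = 0
  · rw [if_pos h, h]
    rw [pvGrouperA.eq_def]
    simp
  · rw [if_neg h]
    rw [PySem.List.foldl_append_singleton_eq_map
      (fun i =>
        (PySem.Dict.ofList (headers.zip
          ((PySem.List.slice values (some i) (some (i + (headers.length : Int)))) ++
            List.replicate (headers.length - (PySem.List.slice values (some i) (some (i + (headers.length : Int)))).length)
              (none : Option String)))).items)]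
    rw [List.nil_append]
    have hlen : PySem.List.len values = (values.length : Int) := PySem.List.len_eq values
    rw [hlen]
    rw [← slices_eq_grouper headers.length (by omega) values]
    rw [List.map_map]
    apply List.map_congr_left
    intro i _
    rfl
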